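-- pv_equiv track=rewrite | github.com/lzhan011/ADR_ESSL | Code/convert_cnf_to_3D_packing/convert_cnf_to_3D_packing_method.py | eval_3cnf_assignment
-- ===== SOURCE A (Python) =====
-- def literal_var(lit: str) -> str:
--     """'x7' or '!x7' -> 'x7'"""
--     return lit[1:] if lit.startswith('!') else lit
--
-- def literal_is_neg(lit: str) -> bool:
--     """Return True iff the literal is negated (starts with '!')."""
--     return lit.startswith('!')
--
-- def eval_3cnf_assignment(clauses_3, asg_dict):
--     """asg_dict: {'x1':True/False, ...}"""
--     for C in clauses_3:
--         sat = False
--         for lit in C: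
--             var = literal_var(lit)
--             val = asg_dict.get(var, None)
--             if val is None:
--                 return False
--             lit_true = val if not literal_is_neg(lit) else (not val)
--             sat = sat or lit_true
--         if not sat:
--             return False
--     return True
-- ===== SOURCE B (Python) =====
-- def eval_3cnf_assignment(clauses_3, asg_dict):
--     """asg_dict: {'x1':True/False, ...}"""
--     # Pass 1: every literal's variable must be assigned (non-None); otherwise False.
--     for C in clauses_3:
--         for lit in C:
--             var = lit[1:] if lit.startswith('!') else lit
--             if asg_dict.get(var) is None:
--                 return False
--     # Pass 2: every clause must contain a true literal.
--     return all(
--         any((not asg_dict[lit[1:]]) if lit.startswith('!') else asg_dict[lit]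
--             for lit in C)
--         for C in clauses_3)
-- ===== Notes on version B (the rewrite author's own statement) =====
-- stated objective: alternative
-- what changed: Replaced A's single fused loop (per-clause sat accumulator with early returns for both missing variables and unsatisfied clauses) with two separately-shaped passes: an up-front completeness scan over all literals, then an all/any satisfaction check with different short-circuiting.
import Mathlib
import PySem

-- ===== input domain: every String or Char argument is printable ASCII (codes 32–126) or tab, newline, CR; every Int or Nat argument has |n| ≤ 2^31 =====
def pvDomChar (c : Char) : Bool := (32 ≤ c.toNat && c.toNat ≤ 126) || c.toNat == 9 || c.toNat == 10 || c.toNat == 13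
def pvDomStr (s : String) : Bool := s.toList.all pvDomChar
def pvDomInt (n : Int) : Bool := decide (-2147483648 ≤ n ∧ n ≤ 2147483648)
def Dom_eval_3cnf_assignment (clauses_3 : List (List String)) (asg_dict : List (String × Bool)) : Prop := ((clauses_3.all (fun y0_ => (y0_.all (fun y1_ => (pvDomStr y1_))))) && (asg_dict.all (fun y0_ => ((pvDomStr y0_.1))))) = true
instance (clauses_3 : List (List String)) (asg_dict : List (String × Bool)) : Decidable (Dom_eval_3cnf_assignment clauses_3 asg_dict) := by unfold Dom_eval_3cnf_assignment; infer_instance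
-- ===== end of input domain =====

-- B replaces A's single fused loop (per-clause sat accumulator with early returns) by two
-- separately-shaped passes: a completeness scan over all literals, then an all/any check
-- (objective: alternative decomposition, same cost).

-- ===== PORT A =====
-- 'x7' or '!x7' -> 'x7'
def literal_var (lit : String) : String :=
  if PySem.Str.startswith lit "!" then PySem.Str.slice lit (some 1) none else lit

-- True iff the literal is negated
def literal_is_neg (lit : String) : Bool := PySem.Str.startswith lit "!"

-- A's inner 'for lit in C' loop with accumulator sat; none = the 'return False' on a missing var
def pvA_clause (asg_dict : List (String × Bool)) : List String → Bool → Option Bool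
  | [], sat => some sat
  | lit :: rest, sat =>
    match (PySem.Dict.mk asg_dict).get? (literal_var lit) with
    | none => none
    | some val =>
      let lit_true := if !literal_is_neg lit then val else !val
      pvA_clause asg_dict rest (sat || lit_true)

-- A's outer 'for C in clauses_3' loop
def pvA_go (asg_dict : List (String × Bool)) : List (List String) → Bool
  | [] => true
  | C :: rest =>
    match pvA_clause asg_dict C false with
    | none => false
    | some sat => if !sat then false else pvA_go asg_dict rest

def eval_3cnf_assignment (clauses_3 : List (List String)) (asg_dict : List (String × Bool)) : Bool :=
  pvA_go asg_dict clauses_3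

-- ===== PORT B =====
-- lit[1:] if lit.startswith('!') else lit
def pvB_var (lit : String) : String :=
  if PySem.Str.startswith lit "!" then PySem.Str.slice lit (some 1) none else lit

-- asg_dict.get(var) is not None
def pvB_present (asg_dict : List (String × Bool)) (lit : String) : Bool :=
  ((PySem.Dict.mk asg_dict).get? (pvB_var lit)).isSome

-- (not asg_dict[lit[1:]]) if lit.startswith('!') else asg_dict[lit]
-- (dict[...] ported as get? + getD; unreachable default, keys were checked in pass 1)
def pvB_lit (asg_dict : List (String × Bool)) (lit : String) : Bool :=
  if PySem.Str.startswith lit "!" then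
    !(((PySem.Dict.mk asg_dict).get? (PySem.Str.slice lit (some 1) none)).getD false)
  else ((PySem.Dict.mk asg_dict).get? lit).getD false

def eval_3cnf_assignment_alt (clauses_3 : List (List String)) (asg_dict : List (String × Bool)) : Bool :=
  if !(clauses_3.all fun C => C.all (pvB_present asg_dict)) then false
  else clauses_3.all fun C => C.any (pvB_lit asg_dict)

-- ===== PRECONDITION & SPEC =====
def Spec_eval_3cnf_assignment (clauses_3 : List (List String)) (asg_dict : List (String × Bool)) (out : Bool) : Prop := out = eval_3cnf_assignment_alt clauses_3 asg_dict
instance (clauses_3 : List (List String)) (asg_dict : List (String × Bool)) (out : Bool) : Decidable (Spec_eval_3cnf_assignment clauses_3 asg_dict out) := by unfold Spec_eval_3cnf_assignment; infer_instance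

-- ===== CLAIM (what is proved, stated in full; the proofs are below) =====
def Claim_equal_eval_3cnf_assignment : Prop := ∀ (clauses_3 : List (List String)) (asg_dict : List (String × Bool)), Dom_eval_3cnf_assignment clauses_3 asg_dict → Spec_eval_3cnf_assignment clauses_3 asg_dict (eval_3cnf_assignment clauses_3 asg_dict)

-- ===== LEMMAS AND PROOFS =====

-- A's clause loop in closed form: none iff some variable is missing, else the or of the literal truths.
theorem pvA_clause_eq (asg_dict : List (String × Bool)) (C : List String) (sat : Bool) :
    pvA_clause asg_dict C sat =
      if C.all (pvB_present asg_dict) then some (sat || C.any (pvB_lit asg_dict)) else none := by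
  induction C generalizing sat with
  | nil => simp [pvA_clause]
  | cons lit rest ih =>
    simp only [pvA_clause, List.all_cons, List.any_cons]
    cases h : (PySem.Dict.mk asg_dict).get? (literal_var lit) with
    | none =>
      have : pvB_present asg_dict lit = false := by
        rw [pvB_present, show pvB_var lit = literal_var lit from rfl, h]; rfl
      simp [this]
    | some val =>
      have hp : pvB_present asg_dict lit = true := by
        rw [pvB_present, show pvB_var lit = literal_var lit from rfl, h]; rfl
      have hl : pvB_lit asg_dict lit = (if !literal_is_neg lit then val else !val) := by
        unfold pvB_lit literal_is_neg
        by_cases hs : PySem.Str.startswith lit "!" = true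
        · have h' := h; rw [literal_var, if_pos hs] at h'
          rw [if_pos hs, h']; simp only [hs]; simp
        · have h' := h; rw [literal_var, if_neg hs] at h'
          rw [if_neg hs, h']
          simp only [Bool.not_eq_true] at hs
          simp only [hs]; simp
      simp [ih, hp, hl, Bool.or_assoc]

theorem pvA_go_eq (asg_dict : List (String × Bool)) (clauses_3 : List (List String)) :
    pvA_go asg_dict clauses_3 = eval_3cnf_assignment_alt clauses_3 asg_dict := by
  induction clauses_3 with
  | nil => simp [pvA_go, eval_3cnf_assignment_alt]
  | cons C rest ih =>
    simp only [pvA_go, pvA_clause_eq]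
    by_cases hp : C.all (pvB_present asg_dict) = true
    · rw [if_pos hp]
      by_cases hs : C.any (pvB_lit asg_dict) = true
      · simp only [Bool.false_or, hs]
        rw [ih]
        simp [eval_3cnf_assignment_alt, hp, hs]
      · simp only [Bool.false_or, hs]
        simp [eval_3cnf_assignment_alt, hp, hs]
    · rw [if_neg hp]
      simp [eval_3cnf_assignment_alt, hp]

-- ===== VERDICT (by name: the statement is the Claim_ definition above) =====
theorem eval_3cnf_assignment_spec : Claim_equal_eval_3cnf_assignment := by
  intro clauses_3 asg_dict _
  unfold Spec_eval_3cnf_assignment eval_3cnf_assignment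
  exact pvA_go_eq asg_dict clauses_3
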